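-- pv_equiv track=rewrite | github.com/williamlagos/python-coding | solving/math/digitsum.py | waysToChooseSum
-- ===== SOURCE A (Python) =====
-- from collections import defaultdict
--
-- def waysToChooseSum(a, b):
--     # Write your code here
--     def sum_digits(n): # calculate the sum of digits of each coupon
--         r = 0
--         while n:
--             r, n = r + n % 10, n // 10
--         return r
--
--     sum_coupon = [ sum_digits(i) for i in range(a, b + 1) ]
--     d = defaultdict(int)
--     for i in sum_coupon: d[i] +=1
--
--     max_list = []
--     max_count = 1 # maximum of the counter
--     for i in d.keys():
--         if d[i] == max_count:
--             max_list.append(i)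
--         elif d[i] > max_count:
--             max_count = d[i]
--             max_list[:] = [] # clear previous list
--             max_list.append(i)
--
--     return(len(max_list), max_count)
-- ===== SOURCE B (Python) =====
-- def waysToChooseSum(a, b):
--     def digit_sum(n):
--         return n if n < 10 else n % 10 + digit_sum(n // 10)
--
--     counts = {}
--     best = 1
--     nbest = 0
--     for n in range(a, b + 1):
--         s = digit_sum(n)
--         c = counts.get(s, 0) + 1
--         counts[s] = c
--         if c > best:
--             best, nbest = c, 1
--         elif c == best:
--             nbest += 1
--     return (nbest, best)
-- ===== Notes on version B (the rewrite author's own statement) =====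
-- stated objective: simpler
-- what changed: Replaces A's three passes (materialise the list of digit sums, build a counter, then rescan all keys maintaining an explicit list of argmax keys) by a single fold over the range that maintains the counter together with the running modal count and number of modal values, with a recursive digit sum instead of A's while loop.
import Mathlib
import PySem

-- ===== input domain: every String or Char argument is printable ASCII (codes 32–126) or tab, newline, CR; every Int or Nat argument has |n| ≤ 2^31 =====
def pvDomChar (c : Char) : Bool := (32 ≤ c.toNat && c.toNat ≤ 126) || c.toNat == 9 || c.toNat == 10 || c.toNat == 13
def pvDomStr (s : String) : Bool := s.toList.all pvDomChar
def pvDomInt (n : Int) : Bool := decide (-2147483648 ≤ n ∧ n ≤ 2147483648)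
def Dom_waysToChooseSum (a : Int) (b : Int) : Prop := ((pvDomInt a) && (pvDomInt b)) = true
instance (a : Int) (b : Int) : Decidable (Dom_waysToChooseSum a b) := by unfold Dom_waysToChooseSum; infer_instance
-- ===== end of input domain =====

-- B replaces A's three passes (list of digit sums, counter, rescan of all keys keeping a list of
-- argmax keys) by a single fold maintaining the counter together with the running modal count and
-- the number of modal values (objective: simpler; same asymptotic cost).

-- ===== PORT A =====
def pvSumDigitsLoopA (r : Int) (n : Int) : Int :=
  if _h : 0 < n then pvSumDigitsLoopA (r + PySem.Int.mod n 10) (PySem.Int.floordiv n 10) else r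
termination_by n.toNat
decreasing_by
  rw [PySem.Int.floordiv_eq_ediv_of_pos (by omega : (0:Int) < 10)]
  have h1 : n / 10 < n := Int.ediv_lt_of_lt_mul (by omega) (by omega)
  have h2 : 0 ≤ n / 10 := Int.ediv_nonneg (by omega) (by omega)
  omega

def sumDigitsA (n : Int) : Int := pvSumDigitsLoopA 0 n

def waysToChooseSum (a : Int) (b : Int) : List Int :=
  let sumCoupon := (PySem.List.pyRange a (b + 1) 1).map sumDigitsA
  let d := sumCoupon.foldl (fun d i => d.modify i 0 (· + 1)) PySem.Dict.empty
  let r := d.keys.foldl (fun (st : List Int × Int) i =>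
    if d.getD i 0 = st.2 then (st.1 ++ [i], st.2)
    else if d.getD i 0 > st.2 then ([i], d.getD i 0)
    else st) ([], 1)
  [(r.1.length : Int), r.2]

-- ===== PORT B =====
def pvDigitSumB (n : Int) : Int :=
  if _h : n < 10 then n else PySem.Int.mod n 10 + pvDigitSumB (PySem.Int.floordiv n 10)
termination_by n.toNat
decreasing_by
  rw [PySem.Int.floordiv_eq_ediv_of_pos (by omega : (0:Int) < 10)]
  have h1 : n / 10 < n := Int.ediv_lt_of_lt_mul (by omega) (by omega)
  have h2 : 0 ≤ n / 10 := Int.ediv_nonneg (by omega) (by omega)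
  omega

def waysToChooseSum_alt (a : Int) (b : Int) : List Int :=
  let st := (PySem.List.pyRange a (b + 1) 1).foldl
    (fun (st : PySem.Dict Int Int × Int × Int) n =>
      let s := pvDigitSumB n
      let c := st.1.getD s 0 + 1
      if c > st.2.1 then (st.1.insert s c, c, 1)
      else if c = st.2.1 then (st.1.insert s c, st.2.1, st.2.2 + 1)
      else (st.1.insert s c, st.2.1, st.2.2))
    (PySem.Dict.empty, 1, 0)
  [st.2.2, st.2.1]

-- ===== PRECONDITION & SPEC =====
-- A's sum_digits runs `while n: r, n = r + n % 10, n // 10`, which loops forever on negative n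
-- (n // 10 stays -1); Pre_ therefore excludes exactly the nonempty ranges that contain a negative
-- integer (a < 0 ≤ ... with a ≤ b), where A never returns.
def Pre_waysToChooseSum (a : Int) (b : Int) : Prop := b < a ∨ 0 ≤ a
instance (a : Int) (b : Int) : Decidable (Pre_waysToChooseSum a b) := by
  unfold Pre_waysToChooseSum; infer_instance

def pvWitness_waysToChooseSum : Int × Int := (1, 20)

def Spec_waysToChooseSum (a : Int) (b : Int) (out : List Int) : Prop := out = waysToChooseSum_alt a b
instance (a : Int) (b : Int) (out : List Int) : Decidable (Spec_waysToChooseSum a b out) := by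
  unfold Spec_waysToChooseSum; infer_instance

-- ===== CLAIM =====
def Claim_equal_waysToChooseSum : Prop := ∀ (a : Int) (b : Int), Dom_waysToChooseSum a b → Pre_waysToChooseSum a b → Spec_waysToChooseSum a b (waysToChooseSum a b)

-- ===== LEMMAS AND PROOFS =====

lemma pv_loop_pos (r n : Int) (h : 0 < n) :
    pvSumDigitsLoopA r n = pvSumDigitsLoopA (r + PySem.Int.mod n 10) (PySem.Int.floordiv n 10) := by
  rw [pvSumDigitsLoopA, dif_pos h]

lemma pv_loop_nonpos (r n : Int) (h : ¬ 0 < n) : pvSumDigitsLoopA r n = r := by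
  rw [pvSumDigitsLoopA, dif_neg h]

lemma pv_dsB_lt (n : Int) (h : n < 10) : pvDigitSumB n = n := by
  rw [pvDigitSumB, dif_pos h]

lemma pv_dsB_ge (n : Int) (h : ¬ n < 10) :
    pvDigitSumB n = PySem.Int.mod n 10 + pvDigitSumB (PySem.Int.floordiv n 10) := by
  rw [pvDigitSumB, dif_neg h]

lemma pv_loop_acc (k : Nat) : ∀ (n r : Int), n.toNat ≤ k → pvSumDigitsLoopA r n = r + pvSumDigitsLoopA 0 n := by
  induction k with
  | zero =>
    intro n r h
    rw [pv_loop_nonpos r n (by omega), pv_loop_nonpos 0 n (by omega)]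
    omega
  | succ k ih =>
    intro n r h
    by_cases hn : 0 < n
    · have hfd : PySem.Int.floordiv n 10 = n / 10 := PySem.Int.floordiv_eq_ediv_of_pos (by omega)
      have h1 : n / 10 < n := Int.ediv_lt_of_lt_mul (by omega) (by omega)
      have h2 : 0 ≤ n / 10 := Int.ediv_nonneg (by omega) (by omega)
      have hk : (PySem.Int.floordiv n 10).toNat ≤ k := by rw [hfd]; omega
      rw [pv_loop_pos r n hn, pv_loop_pos 0 n hn]
      rw [ih _ (r + PySem.Int.mod n 10) hk, ih _ (0 + PySem.Int.mod n 10) hk]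
      omega
    · rw [pv_loop_nonpos r n hn, pv_loop_nonpos 0 n hn]
      omega

lemma pv_sumDigits_eq_aux (k : Nat) : ∀ n : Int, 0 ≤ n → n.toNat ≤ k → sumDigitsA n = pvDigitSumB n := by
  induction k with
  | zero =>
    intro n h0 hk
    have hn : n = 0 := by omega
    subst hn
    rw [sumDigitsA, pv_loop_nonpos 0 0 (by omega), pv_dsB_lt 0 (by omega)]
  | succ k ih =>
    intro n h0 hk
    by_cases hlt : n < 10
    · rw [pv_dsB_lt n hlt]
      unfold sumDigitsA
      by_cases hp : 0 < n
      · have hm : PySem.Int.mod n 10 = n := by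
          rw [PySem.Int.mod_eq_emod_of_pos (by omega)]
          exact Int.emod_eq_of_lt (by omega) (by omega)
        have hf : PySem.Int.floordiv n 10 = 0 := by
          rw [PySem.Int.floordiv_eq_ediv_of_pos (by omega)]
          exact Int.ediv_eq_zero_of_lt (by omega) (by omega)
        rw [pv_loop_pos 0 n hp, hm, hf, pv_loop_nonpos _ 0 (by omega)]
        omega
      · have hn : n = 0 := by omega
        subst hn
        rw [pv_loop_nonpos 0 0 (by omega)]
    · have hfd : PySem.Int.floordiv n 10 = n / 10 := PySem.Int.floordiv_eq_ediv_of_pos (by omega)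
      have h1 : n / 10 < n := Int.ediv_lt_of_lt_mul (by omega) (by omega)
      have h2 : 0 ≤ n / 10 := Int.ediv_nonneg (by omega) (by omega)
      rw [pv_dsB_ge n hlt]
      unfold sumDigitsA
      rw [pv_loop_pos 0 n (by omega)]
      rw [pv_loop_acc k _ _ (by rw [hfd]; omega)]
      rw [show pvSumDigitsLoopA 0 (PySem.Int.floordiv n 10) = sumDigitsA (PySem.Int.floordiv n 10) from rfl]
      rw [ih _ (by rw [hfd]; omega) (by rw [hfd]; omega)]
      omega

lemma pv_sumDigits_eq (n : Int) (h : 0 ≤ n) : sumDigitsA n = pvDigitSumB n :=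
  pv_sumDigits_eq_aux n.toNat n h le_rfl

lemma pv_foldl_max_shift : ∀ (w : List Int) (i c : Int), w.foldl max (max i c) = max (w.foldl max i) c := by
  intro w
  induction w with
  | nil => intro i c; rfl
  | cons a w ih =>
    intro i c
    simp only [List.foldl_cons]
    rw [max_right_comm, ih]

lemma pv_foldl_max_middle (u w : List Int) (i c : Int) :
    (u ++ c :: w).foldl max i = max ((u ++ w).foldl max i) c := by
  simp only [List.foldl_append, List.foldl_cons]
  rw [pv_foldl_max_shift]

lemma pv_scan_snd (val : Int → Int) : ∀ (ks ml : List Int) (mc : Int),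
    (ks.foldl (fun (st : List Int × Int) i =>
      if val i = st.2 then (st.1 ++ [i], st.2)
      else if val i > st.2 then ([i], val i)
      else st) (ml, mc)).2
    = ks.foldl (fun m k => max m (val k)) mc := by
  intro ks
  induction ks with
  | nil => intro ml mc; rfl
  | cons k ks ih =>
    intro ml mc
    simp only [List.foldl_cons]
    rcases lt_trichotomy (val k) mc with h | h | h
    · rw [if_neg (by omega), if_neg (by omega), ih, max_eq_left (le_of_lt h)]
    · rw [if_pos h, ih, h, max_self]
    · rw [if_neg (by omega), if_pos (by omega), ih, max_eq_right (le_of_lt h)]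

lemma pv_scan_fst (val : Int → Int) : ∀ (ks ml : List Int) (mc : Int),
    (ks.foldl (fun (st : List Int × Int) i =>
      if val i = st.2 then (st.1 ++ [i], st.2)
      else if val i > st.2 then ([i], val i)
      else st) (ml, mc)).1
    = (if ks.foldl (fun m k => max m (val k)) mc = mc then ml else [])
      ++ ks.filter (fun k => val k = ks.foldl (fun m k => max m (val k)) mc) := by
  intro ks
  induction ks with
  | nil => intro ml mc; simp
  | cons k ks ih =>
    intro ml mc
    simp only [List.foldl_cons]
    rcases lt_trichotomy (val k) mc with h | h | h
    · rw [if_neg (by omega), if_neg (by omega), ih]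
      simp only [max_eq_left (le_of_lt h)]
      have hini := (PySem.List.le_foldl_max_int ks val mc).1
      congr 1
      rw [List.filter_cons, if_neg (by simp; omega)]
    · rw [if_pos h, ih]
      simp only [h, max_self]
      by_cases hM : ks.foldl (fun m k => max m (val k)) mc = mc
      · rw [if_pos hM, if_pos hM, List.filter_cons, if_pos (by simp [h, hM])]
        simp
      · rw [if_neg hM, if_neg hM, List.filter_cons, if_neg (by simp [h]; omega)]
    · rw [if_neg (by omega), if_pos (by omega), ih]
      simp only [max_eq_right (le_of_lt h)]
      have hini := (PySem.List.le_foldl_max_int ks val (val k)).1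
      rw [if_neg (show ¬ (ks.foldl (fun m k => max m (val k)) (val k) = mc) by omega)]
      by_cases hMk : ks.foldl (fun m k => max m (val k)) (val k) = val k
      · rw [if_pos hMk, List.filter_cons, if_pos (by simp [hMk])]
        simp
      · rw [if_neg hMk, List.filter_cons, if_neg (by simp; omega)]

def pvMaxOf (xs : List Int) : Int := ((PySem.Dict.counter xs).values).foldl max 1

def pvCntOf (xs : List Int) : Int := (((PySem.Dict.counter xs).values).count (pvMaxOf xs) : Int)

lemma pv_values_counter (xs : List Int) :
    (PySem.Dict.counter xs).values = (PySem.Set.ofList xs).map (fun k => (xs.count k : Int)) := by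
  have h := PySem.Dict.items_counter (xs := xs)
  calc (PySem.Dict.counter xs).values
      = ((PySem.Dict.counter xs).items).map (·.2) := rfl
    _ = ((PySem.Set.ofList xs).map (fun k => (k, (xs.count k : Int)))).map (·.2) := by rw [h]
    _ = (PySem.Set.ofList xs).map (fun k => (xs.count k : Int)) := by rw [List.map_map]; rfl

lemma pv_values_append (xs : List Int) (x : Int) :
    ∃ u w : List Int,
      (PySem.Dict.counter xs).values = u ++ (if x ∈ xs then [(xs.count x : Int)] else []) ++ w
      ∧ (PySem.Dict.counter (xs ++ [x])).values = u ++ ((xs.count x : Int) + 1) :: w := by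
  have hS' : PySem.Set.ofList (xs ++ [x]) = PySem.Set.add (PySem.Set.ofList xs) x :=
    PySem.Set.ofList_append_singleton xs x
  have hcnt : ∀ k : Int, ((xs ++ [x]).count k : Int)
      = if k = x then (xs.count k : Int) + 1 else (xs.count k : Int) := by
    intro k
    by_cases hk : k = x
    · subst hk
      rw [if_pos rfl, List.count_append, List.count_singleton, if_pos (by simp)]
      push_cast; ring
    · rw [if_neg hk, List.count_append, List.count_singleton, if_neg (by simp; exact fun h => hk h.symm)]
      simp
  by_cases hx : x ∈ xs
  · have hxS : x ∈ PySem.Set.ofList xs := (PySem.Set.mem_ofList xs x).mpr hx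
    obtain ⟨u', w', hSdec⟩ := List.append_of_mem hxS
    have hnd : (u' ++ x :: w').Nodup := hSdec ▸ PySem.Set.nodup_ofList xs
    have hxuw : x ∉ u' ∧ x ∉ w' := by
      have := List.nodup_middle.mp hnd
      simp only [List.nodup_cons, List.mem_append] at this
      exact ⟨fun h => this.1 (Or.inl h), fun h => this.1 (Or.inr h)⟩
    refine ⟨u'.map (fun k => (xs.count k : Int)), w'.map (fun k => (xs.count k : Int)), ?_, ?_⟩
    · rw [pv_values_counter, hSdec, if_pos hx]
      simp
    · rw [pv_values_counter, hS', PySem.Set.add_of_mem hxS, hSdec]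
      simp only [List.map_append, List.map_cons]
      congr 1
      · exact List.map_congr_left (fun k hk => by
          rw [hcnt k, if_neg (fun he => hxuw.1 (by rwa [he] at hk))])
      · congr 1
        · rw [hcnt x, if_pos rfl]
        · exact List.map_congr_left (fun k hk => by
            rw [hcnt k, if_neg (fun he => hxuw.2 (by rwa [he] at hk))])
  · have hxS : x ∉ PySem.Set.ofList xs := fun h => hx ((PySem.Set.mem_ofList xs x).mp h)
    refine ⟨(PySem.Set.ofList xs).map (fun k => (xs.count k : Int)), [], ?_, ?_⟩
    · rw [pv_values_counter, if_neg hx]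
      simp
    · rw [pv_values_counter, hS', PySem.Set.add_of_not_mem hxS]
      simp only [List.map_append, List.map_cons, List.map_nil]
      congr 1
      · exact List.map_congr_left (fun k hk => by
          rw [hcnt k, if_neg (fun he => hxS (by rwa [he] at hk))])
      · rw [hcnt x, if_pos rfl]

lemma pv_count_middle (u w : List Int) (c m : Int) :
    (u ++ c :: w).count m = (u ++ w).count m + (if c = m then 1 else 0) := by
  simp only [List.count_append, List.count_cons, beq_iff_eq]
  omega

lemma pv_bfold (xs : List Int) :
    xs.foldl (fun (st : PySem.Dict Int Int × Int × Int) s =>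
      if st.1.getD s 0 + 1 > st.2.1 then (st.1.insert s (st.1.getD s 0 + 1), st.1.getD s 0 + 1, 1)
      else if st.1.getD s 0 + 1 = st.2.1 then (st.1.insert s (st.1.getD s 0 + 1), st.2.1, st.2.2 + 1)
      else (st.1.insert s (st.1.getD s 0 + 1), st.2.1, st.2.2))
    (PySem.Dict.empty, 1, 0)
    = (PySem.Dict.counter xs, pvMaxOf xs, pvCntOf xs) := by
  induction xs using List.reverseRecOn with
  | nil => rfl
  | append_singleton xs x ih =>
    rw [List.foldl_append, ih]
    simp only [List.foldl_cons, List.foldl_nil]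
    have hdict := PySem.Dict.foldl_insert_getD_add_one_eq_counter (xs := xs ++ [x])
    rw [List.foldl_append, List.foldl_cons, List.foldl_nil,
        PySem.Dict.foldl_insert_getD_add_one_eq_counter] at hdict
    have hg : (PySem.Dict.counter xs).getD x 0 = (xs.count x : Int) :=
      PySem.Dict.getD_counter xs x
    rw [hg] at hdict
    obtain ⟨u, w, hold, hnew⟩ := pv_values_append xs x
    have hK := PySem.List.le_foldl_max (u ++ w) (1 : Int)
    have hMnew : pvMaxOf (xs ++ [x]) = max ((u ++ w).foldl max 1) ((xs.count x : Int) + 1) := by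
      rw [pvMaxOf, hnew, pv_foldl_max_middle]
    have hCnew : pvCntOf (xs ++ [x]) =
        (((u ++ w).count (pvMaxOf (xs ++ [x])) : Int)
          + (if (xs.count x : Int) + 1 = pvMaxOf (xs ++ [x]) then 1 else 0)) := by
      rw [pvCntOf, hnew, pv_count_middle]
      push_cast
      split_ifs <;> simp
    by_cases hx : x ∈ xs
    · rw [if_pos hx] at hold
      have hMold : pvMaxOf xs = max ((u ++ w).foldl max 1) ((xs.count x : Int)) := by
        rw [pvMaxOf, hold, List.append_assoc, List.singleton_append, pv_foldl_max_middle]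
      have hCold : pvCntOf xs =
          (((u ++ w).count (pvMaxOf xs) : Int)
            + (if (xs.count x : Int) = pvMaxOf xs then 1 else 0)) := by
        rw [pvCntOf, hold, List.append_assoc, List.singleton_append, pv_count_middle]
        push_cast
        split_ifs <;> simp
      have hc1 : (1 : Int) ≤ (xs.count x : Int) := by
        have := List.count_pos_iff.mpr hx
        omega
      rcases lt_trichotomy (pvMaxOf xs) ((xs.count x : Int) + 1) with h | h | h
      · -- c > M : new max c, count 1
        rw [hg, if_pos (by omega)]
        have hMc : pvMaxOf xs = (xs.count x : Int) := by
          rw [hMold] at h ⊢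
          omega
        have hKle : (u ++ w).foldl max 1 ≤ (xs.count x : Int) := by
          rw [hMold] at hMc
          omega
        have hMnewc : pvMaxOf (xs ++ [x]) = (xs.count x : Int) + 1 := by
          rw [hMnew]
          omega
        have hzero : (u ++ w).count ((xs.count x : Int) + 1) = 0 := by
          rw [List.count_eq_zero]
          intro hmem
          have := hK.2 _ hmem
          omega
        simp only [Prod.mk.injEq]
        refine ⟨hdict, by omega, ?_⟩
        rw [hCnew, hMnewc, hzero, if_pos rfl]
        simp
      · -- c = M : same max, count + 1
        rw [hg, if_neg (by omega), if_pos (by omega)]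
        have hMnewM : pvMaxOf (xs ++ [x]) = pvMaxOf xs := by
          rw [hMnew, ← h, hMold]
          have := hK.1
          omega
        simp only [Prod.mk.injEq]
        refine ⟨hdict, hMnewM.symm, ?_⟩
        rw [hCnew, hMnewM, hCold]
        rw [if_pos h.symm, if_neg (by omega)]
        omega
      · -- c < M : unchanged
        rw [hg, if_neg (by omega), if_neg (by omega)]
        have hKM : (u ++ w).foldl max 1 = pvMaxOf xs := by
          rw [hMold]
          rw [hMold] at h
          omega
        have hMnewM : pvMaxOf (xs ++ [x]) = pvMaxOf xs := by
          rw [hMnew, hKM]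
          omega
        simp only [Prod.mk.injEq]
        refine ⟨hdict, hMnewM.symm, ?_⟩
        rw [hCnew, hMnewM, hCold]
        rw [if_neg (by omega), if_neg (by omega)]
    · rw [if_neg hx] at hold
      have hcnt0 : xs.count x = 0 := List.count_eq_zero.mpr hx
      rw [hcnt0] at hdict
      have hMold : pvMaxOf xs = (u ++ w).foldl max 1 := by
        rw [pvMaxOf, hold]
        simp
      have hCold : pvCntOf xs = ((u ++ w).count (pvMaxOf xs) : Int) := by
        rw [pvCntOf, hold]
        simp
      have hMnewM : pvMaxOf (xs ++ [x]) = pvMaxOf xs := by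
        rw [hMnew, hcnt0, hMold]
        have := hK.1
        push_cast
        omega
      rcases eq_or_lt_of_le hK.1 with h1 | h1
      · -- max is 1 : c = 1 = M
        rw [hg, hcnt0, if_neg (by rw [hMold, ← h1]; omega), if_pos (by rw [hMold, ← h1]; omega)]
        simp only [Prod.mk.injEq]
        refine ⟨hdict, hMnewM.symm, ?_⟩
        rw [hCnew, hMnewM, hCold, hcnt0]
        rw [if_pos (show ((0:Nat):Int) + 1 = pvMaxOf xs by rw [hMold, ← h1]; norm_num)]
      · -- max > 1 : c = 1 < M
        rw [hg, hcnt0, if_neg (by rw [hMold]; omega), if_neg (by rw [hMold]; omega)]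
        simp only [Prod.mk.injEq]
        refine ⟨hdict, hMnewM.symm, ?_⟩
        rw [hCnew, hMnewM, hCold, hcnt0]
        rw [if_neg (show ¬ ((0:Nat):Int) + 1 = pvMaxOf xs by rw [hMold]; push_cast; omega)]
        omega

lemma pv_alt_eq (a b : Int) :
    waysToChooseSum_alt a b
      = [pvCntOf ((PySem.List.pyRange a (b+1) 1).map pvDigitSumB),
         pvMaxOf ((PySem.List.pyRange a (b+1) 1).map pvDigitSumB)] := by
  have hB := pv_bfold ((PySem.List.pyRange a (b+1) 1).map pvDigitSumB)
  rw [List.foldl_map] at hB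
  unfold waysToChooseSum_alt
  rw [hB]

lemma pv_a_eq (xs : List Int) :
    (let d := xs.foldl (fun d i => d.modify i 0 (· + 1)) PySem.Dict.empty
     let r := d.keys.foldl (fun (st : List Int × Int) i =>
       if d.getD i 0 = st.2 then (st.1 ++ [i], st.2)
       else if d.getD i 0 > st.2 then ([i], d.getD i 0)
       else st) ([], 1)
     [(r.1.length : Int), r.2])
    = [pvCntOf xs, pvMaxOf xs] := by
  simp only []
  rw [← PySem.Dict.counter_eq_foldl]
  have hnd : (PySem.Dict.counter xs).keys.Nodup := PySem.Dict.nodup_keys_counter xs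
  have hvals : (PySem.Dict.counter xs).values
      = (PySem.Dict.counter xs).keys.map (fun k => (PySem.Dict.counter xs).getD k 0) :=
    PySem.Dict.values_eq_map_keys _ hnd 0
  have hM : (PySem.Dict.counter xs).keys.foldl
      (fun m k => max m ((PySem.Dict.counter xs).getD k 0)) 1 = pvMaxOf xs := by
    rw [pvMaxOf, hvals, List.foldl_map]
  have hsnd := pv_scan_snd (fun i => (PySem.Dict.counter xs).getD i 0)
    (PySem.Dict.counter xs).keys [] 1
  have hfst := pv_scan_fst (fun i => (PySem.Dict.counter xs).getD i 0)
    (PySem.Dict.counter xs).keys [] 1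
  simp only [] at hsnd hfst
  rw [hM] at hsnd hfst
  congr 1
  · -- lengths
    rw [hfst]
    have : (if pvMaxOf xs = 1 then ([] : List Int) else []) = [] := by split <;> rfl
    rw [this, List.nil_append]
    -- ↑(filter.length) = pvCntOf xs
    rw [pvCntOf, hvals]
    congr 1
    rw [List.count, List.countP_map, List.countP_eq_length_filter]
    rfl
  · congr 1

theorem pv_main (a b : Int) (hpre : b < a ∨ 0 ≤ a) : waysToChooseSum a b = waysToChooseSum_alt a b := by
  have hnn : ∀ n ∈ PySem.List.pyRange a (b+1) 1, (0:Int) ≤ n := by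
    intro n hn
    rw [PySem.List.mem_pyRange_one] at hn
    rcases hpre with h | h <;> omega
  have hmap : (PySem.List.pyRange a (b+1) 1).map sumDigitsA
      = (PySem.List.pyRange a (b+1) 1).map pvDigitSumB :=
    List.map_congr_left (fun n hn => pv_sumDigits_eq n (hnn n hn))
  rw [pv_alt_eq]
  unfold waysToChooseSum
  rw [hmap]
  exact pv_a_eq ((PySem.List.pyRange a (b+1) 1).map pvDigitSumB)

-- ===== VERDICT =====
theorem waysToChooseSum_spec : Claim_equal_waysToChooseSum := by
  intro a b _hdom hpre
  unfold Spec_waysToChooseSum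
  exact pv_main a b hpre
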